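-- pv_equiv track=rewrite | github.com/nazmulcuet11/acm | InterviewBit/strings/stringoholics.py | build_suffix_table
-- ===== SOURCE A (Python) =====
-- def build_suffix_table(pattern):
--     suffix_table = [0]
--     for i in range(1, len(pattern)):
--         j = suffix_table[i-1]
--         while j > 0 and pattern[j] != pattern[i]:
--             j = suffix_table[j-1]
--         if pattern[j] == pattern[i]:
--             suffix_table.append(j + 1)
--         else:
--             suffix_table.append(0)
--
--     # i, j = 1, 0
--     # suffix_table = [0]
--     # while i < len(pattern):
--     #     if pattern[i] == pattern[j]:
--     #         suffix_table.append(j + 1)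
--     #         i += 1
--     #         j += 1
--     #     else:
--     #         if j != 0:
--     #             j = suffix_table[j-1]
--     #         else:
--     #             suffix_table.append(0)
--     #             i += 1
--
--     min_len = len(pattern) - suffix_table[len(pattern)-1]
--     if len(pattern) % min_len == 0:
--         return min_len
--     return len(pattern)
-- ===== SOURCE B (Python) =====
-- def build_suffix_table(pattern):
--     n = len(pattern)
--     for b in range(1, n + 1):
--         if all(pattern[i] == pattern[i - b] for i in range(b, n)):
--             break
--     if n % b == 0:
--         return b
--     return n
-- ===== Notes on version B (the rewrite author's own statement) =====
-- stated objective: alternative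
-- what changed: B replaces A's KMP prefix-function table by a direct search for the smallest period b (first b>=1 with pattern[i]==pattern[i-b] for all i>=b), followed by the same divisibility test; equivalence is the border/period duality of the failure function.
import Mathlib
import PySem

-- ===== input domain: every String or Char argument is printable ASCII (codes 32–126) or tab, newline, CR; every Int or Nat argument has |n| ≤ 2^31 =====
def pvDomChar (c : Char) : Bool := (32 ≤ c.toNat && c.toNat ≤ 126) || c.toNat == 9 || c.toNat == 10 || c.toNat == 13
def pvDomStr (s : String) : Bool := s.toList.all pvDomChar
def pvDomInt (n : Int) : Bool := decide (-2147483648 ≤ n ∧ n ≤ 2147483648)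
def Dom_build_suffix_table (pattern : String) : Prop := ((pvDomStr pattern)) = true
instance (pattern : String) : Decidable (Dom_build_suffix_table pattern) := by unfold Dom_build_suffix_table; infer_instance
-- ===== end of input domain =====

-- B replaces A's KMP prefix-function table by a direct search for the smallest period
-- (objective: alternative, not faster); both raise on the empty string, excluded by Pre_.

-- ===== PORT A =====
-- while j > 0 and pattern[j] != pattern[i]: j = suffix_table[j-1]
-- fuel-based totality guard: each iteration strictly decreases j (table entries of index m are ≤ m),
-- so fuel = j+1 always suffices; indices are always in range, getD default is never read.
def pvJLoop (l : List Char) (st : List Nat) (i : Nat) : Nat → Nat → Nat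
  | 0, j => j
  | fuel+1, j =>
    if 0 < j ∧ l.getD j ' ' ≠ l.getD i ' ' then
      pvJLoop l st i fuel (st.getD (j-1) 0)
    else j

-- one iteration of A's for-loop body at index i
def pvStepA (l : List Char) (st : List Nat) (i : Nat) : List Nat :=
  let j0 := st.getD (i-1) 0
  let j := pvJLoop l st i (j0+1) j0
  if l.getD j ' ' = l.getD i ' ' then st ++ [j + 1] else st ++ [0]

-- suffix_table after the for-loop over range(1, len(pattern))
def pvTableA (l : List Char) : List Nat :=
  (List.range' 1 (l.length - 1)).foldl (pvStepA l) [0]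

def build_suffix_table (pattern : String) : Int :=
  let l := pattern.toList
  let n := l.length
  let st := pvTableA l
  let minLen : Int := (n : Int) - (st.getD (n - 1) 0 : Nat)
  -- Python raises ZeroDivisionError when minLen = 0 (only for pattern = "", excluded by Pre_)
  if minLen ≤ 0 then 0
  else if (n : Int) % minLen = 0 then minLen else (n : Int)

-- ===== PORT B =====
-- all(pattern[i] == pattern[i-b] for i in range(b, n))
def pvCheck (l : List Char) (b : Nat) : Bool :=
  (List.range' b (l.length - b)).all (fun i => l.getD i ' ' == l.getD (i - b) ' ')

-- for b in range(1, n+1): if check(b): break  — fuel = number of remaining candidates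
def pvFind (l : List Char) : Nat → Nat → Nat
  | b, 0 => b
  | b, fuel+1 => if pvCheck l b then b else pvFind l (b+1) fuel

def build_suffix_table_alt (pattern : String) : Int :=
  let l := pattern.toList
  let n := l.length
  let b := pvFind l 1 n
  if (n : Int) % (b : Int) = 0 then (b : Int) else (n : Int)

-- ===== PRECONDITION & SPEC =====
-- Pre_ excludes only the empty string, on which A raises ZeroDivisionError (0 % 0) and B also raises.
def Pre_build_suffix_table (pattern : String) : Prop := pattern ≠ ""
instance (pattern : String) : Decidable (Pre_build_suffix_table pattern) := by unfold Pre_build_suffix_table; infer_instance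
def pvWitness_build_suffix_table : String := "abab"

def Spec_build_suffix_table (pattern : String) (out : Int) : Prop := out = build_suffix_table_alt pattern
instance (pattern : String) (out : Int) : Decidable (Spec_build_suffix_table pattern out) := by unfold Spec_build_suffix_table; infer_instance

-- ===== CLAIM (what is proved, stated in full; the proofs are below) =====
def Claim_equal_build_suffix_table : Prop := ∀ (pattern : String), Dom_build_suffix_table pattern → Pre_build_suffix_table pattern → Spec_build_suffix_table pattern (build_suffix_table pattern)

-- ===== LEMMAS AND PROOFS =====

-- "k is a border of l's prefix of length n" (proper border: k < n), over getD so it is total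
def pvBrd (l : List Char) (n k : Nat) : Bool :=
  decide (k < n) && (List.range k).all (fun i => l.getD i ' ' == l.getD (n - k + i) ' ')

lemma pvBrd_iff {l : List Char} {n k : Nat} :
    pvBrd l n k = true ↔ k < n ∧ ∀ i < k, l.getD i ' ' = l.getD (n - k + i) ' ' := by
  simp [pvBrd]

-- longest proper border of l's prefix of length n
def pvMb (l : List Char) (n : Nat) : Nat :=
  Nat.findGreatest (fun k => pvBrd l n k = true) (n - 1)

lemma pvBrd_zero {l : List Char} {n : Nat} (hn : 0 < n) : pvBrd l n 0 = true := by
  simp [pvBrd, hn]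

lemma pvMb_brd {l : List Char} {n : Nat} (hn : 0 < n) : pvBrd l n (pvMb l n) = true := by
  have h0 : pvBrd l n 0 = true := pvBrd_zero hn
  unfold pvMb
  exact Nat.findGreatest_spec (P := fun k => pvBrd l n k = true) (Nat.zero_le _) h0

lemma pvMb_lt {l : List Char} {n : Nat} (hn : 0 < n) : pvMb l n < n :=
  ((pvBrd_iff).mp (pvMb_brd hn)).1

lemma pvMb_ge {l : List Char} {n k : Nat} (h : pvBrd l n k = true) : k ≤ pvMb l n := by
  have hk : k < n := ((pvBrd_iff).mp h).1
  exact Nat.le_findGreatest (by omega) h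

lemma pvMb_eq {l : List Char} {n q : Nat} (hq : pvBrd l n q = true)
    (hmax : ∀ k, pvBrd l n k = true → k ≤ q) : pvMb l n = q := by
  have hn : 0 < n := Nat.lt_of_le_of_lt (Nat.zero_le q) ((pvBrd_iff).mp hq).1
  exact le_antisymm (hmax _ (pvMb_brd hn)) (pvMb_ge hq)

-- borders nest: two borders of the same prefix, the smaller is a border of the larger
lemma pvBrd_nest {l : List Char} {n k₁ k₂ : Nat} (h1 : pvBrd l n k₁ = true)
    (h2 : pvBrd l n k₂ = true) (hlt : k₁ < k₂) : pvBrd l k₂ k₁ = true := by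
  rw [pvBrd_iff] at *
  obtain ⟨hk1, e1⟩ := h1
  obtain ⟨hk2, e2⟩ := h2
  refine ⟨hlt, fun i hi => ?_⟩
  have h3 := e2 (k₂ - k₁ + i) (by omega)
  have h4 : n - k₂ + (k₂ - k₁ + i) = n - k₁ + i := by omega
  rw [h4] at h3
  rw [e1 i hi, ← h3]

-- transitivity: a border of a border's prefix is a border
lemma pvBrd_trans {l : List Char} {n j k : Nat} (hj : pvBrd l n j = true)
    (hk : pvBrd l j k = true) : pvBrd l n k = true := by
  rw [pvBrd_iff] at *
  obtain ⟨hjn, ej⟩ := hj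
  obtain ⟨hkj, ek⟩ := hk
  refine ⟨by omega, fun i hi => ?_⟩
  have h1 := ej (j - k + i) (by omega)
  have h2 : n - j + (j - k + i) = n - k + i := by omega
  rw [h2] at h1
  rw [ek i hi, h1]

-- border extension: (k+1) is a border of prefix (i+1) iff k borders prefix i and l[k] = l[i]
lemma pvBrd_succ {l : List Char} {i k : Nat} (hi : 0 < i) :
    pvBrd l (i+1) (k+1) = true ↔ pvBrd l i k = true ∧ l.getD k ' ' = l.getD i ' ' := by
  constructor
  · intro h
    rw [pvBrd_iff] at h
    obtain ⟨hk, e⟩ := h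
    have hki : k < i := by omega
    constructor
    · rw [pvBrd_iff]
      refine ⟨hki, fun m hm => ?_⟩
      have := e m (by omega)
      have h4 : i + 1 - (k + 1) + m = i - k + m := by omega
      rwa [h4] at this
    · have := e k (by omega)
      have h4 : i + 1 - (k + 1) + k = i := by omega
      rwa [h4] at this
  · rintro ⟨h, he⟩
    rw [pvBrd_iff] at *
    obtain ⟨hk, e⟩ := h
    refine ⟨by omega, fun m hm => ?_⟩
    have h4 : i + 1 - (k + 1) + m = i - k + m := by omega
    rw [h4]
    rcases Nat.lt_or_ge m k with hmk | hmk
    · exact e m hmk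
    · have h5 : i - k + m = i := by omega
      rw [h5]
      have hmk' : m = k := by omega
      rw [hmk']; exact he

-- the inner while-loop computes the largest border of prefix i whose next character matches l[i] (or 0)
lemma pvJLoop_spec (l : List Char) (st : List Nat) (i : Nat) (hi : 0 < i)
    (hInv : ∀ m < i, st.getD m 0 = pvMb l (m+1)) :
    ∀ fuel j, j < fuel → pvBrd l i j = true →
      (∀ k, pvBrd l i k = true → l.getD k ' ' = l.getD i ' ' → k ≤ j) →
      pvBrd l i (pvJLoop l st i fuel j) = true ∧
      (∀ k, pvBrd l i k = true → l.getD k ' ' = l.getD i ' ' → k ≤ pvJLoop l st i fuel j) ∧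
      (l.getD (pvJLoop l st i fuel j) ' ' = l.getD i ' ' ∨ pvJLoop l st i fuel j = 0) := by
  intro fuel
  induction fuel with
  | zero => intro j hj; omega
  | succ fuel ih =>
    intro j hj hbrd hmax
    rw [pvJLoop]
    by_cases hg : 0 < j ∧ l.getD j ' ' ≠ l.getD i ' '
    · rw [if_pos hg]
      obtain ⟨hj0, hne⟩ := hg
      have hji : j < i := ((pvBrd_iff).mp hbrd).1
      have hst : st.getD (j-1) 0 = pvMb l j := by
        have := hInv (j-1) (by omega)
        have h4 : j - 1 + 1 = j := by omega
        rwa [h4] at this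
      rw [hst]
      have hmbj : pvBrd l j (pvMb l j) = true := pvMb_brd hj0
      have hmblt : pvMb l j < j := pvMb_lt hj0
      apply ih
      · omega
      · exact pvBrd_trans hbrd hmbj
      · intro k hk hke
        have hkj : k ≤ j := hmax k hk hke
        have hknej : k ≠ j := fun h => hne (h ▸ hke)
        have : pvBrd l j k = true := pvBrd_nest hk hbrd (by omega)
        exact pvMb_ge this
    · rw [if_neg hg]
      rw [not_and_or, not_lt, Nat.le_zero, not_not] at hg
      refine ⟨hbrd, hmax, ?_⟩
      rcases hg with h | h
      · right; exact h
      · left; exact h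

-- one loop iteration appends the longest border of the next prefix
lemma pvStepA_eq (l : List Char) (st : List Nat) (i : Nat) (hi : 0 < i)
    (hInv : ∀ m < i, st.getD m 0 = pvMb l (m+1)) :
    pvStepA l st i = st ++ [pvMb l (i+1)] := by
  rw [pvStepA]
  have hst0 : st.getD (i-1) 0 = pvMb l i := by
    have := hInv (i-1) (by omega)
    have h4 : i - 1 + 1 = i := by omega
    rwa [h4] at this
  set j0 := st.getD (i-1) 0 with hj0def
  have hj0 : j0 = pvMb l i := hst0
  have hbrd0 : pvBrd l i j0 = true := hj0 ▸ pvMb_brd hi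
  have hmax0 : ∀ k, pvBrd l i k = true → l.getD k ' ' = l.getD i ' ' → k ≤ j0 := by
    intro k hk _; rw [hj0]; exact pvMb_ge hk
  obtain ⟨hr1, hr2, hr3⟩ := pvJLoop_spec l st i hi hInv (j0+1) j0 (by omega) hbrd0 hmax0
  set r := pvJLoop l st i (j0+1) j0 with hrdef
  have hri : r < i := ((pvBrd_iff).mp hr1).1
  by_cases hre : l.getD r ' ' = l.getD i ' '
  · rw [if_pos hre]
    congr 1
    have : pvMb l (i+1) = r + 1 := by
      apply pvMb_eq
      · exact (pvBrd_succ hi).mpr ⟨hr1, hre⟩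
      · intro k hk
        match k with
        | 0 => omega
        | k'+1 =>
          obtain ⟨hb, he⟩ := (pvBrd_succ hi).mp hk
          have := hr2 k' hb he
          omega
    rw [this]
  · rw [if_neg hre]
    congr 1
    have hr0 : r = 0 := hr3.resolve_left hre
    have : pvMb l (i+1) = 0 := by
      apply pvMb_eq
      · exact pvBrd_zero (by omega)
      · intro k hk
        match k with
        | 0 => omega
        | k'+1 =>
          obtain ⟨hb, he⟩ := (pvBrd_succ hi).mp hk
          have hk0 := hr2 k' hb he
          rw [hr0] at hk0
          have : k' = 0 := by omega
          subst this
          rw [hr0] at hre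
          exact absurd he hre
    rw [this]
  
-- the whole table: entry m is the longest border of the prefix of length m+1
lemma pvTableA_spec (l : List Char) :
    ∀ c, ((List.range' 1 c).foldl (pvStepA l) [0]).length = c + 1 ∧
      ∀ m < c + 1, ((List.range' 1 c).foldl (pvStepA l) [0]).getD m 0 = pvMb l (m+1) := by
  intro c
  induction c with
  | zero =>
    refine ⟨rfl, fun m hm => ?_⟩
    interval_cases m
    simp [pvMb, List.getD]
  | succ c ih =>
    obtain ⟨hlen, hInv⟩ := ih
    have hcat : List.range' 1 (c+1) = List.range' 1 c ++ [1 + c] := by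
      rw [List.range'_concat]; simp
    rw [hcat, List.foldl_append, List.foldl_cons, List.foldl_nil]
    rw [pvStepA_eq l _ (1+c) (by omega) (by intro m hm; exact hInv m (by omega))]
    constructor
    · simp [hlen]
    · intro m hm
      rcases Nat.lt_or_ge m (c+1) with h | h
      · rw [List.getD_append _ _ _ _ (by omega)]
        exact hInv m h
      · have hmeq : m = c + 1 := by omega
        subst hmeq
        have : (1 + c) + 1 = c + 1 + 1 := by omega
        rw [List.getD_eq_getElem?_getD, List.getElem?_append_right (by omega), hlen]
        simp [this]

-- pvCheck b says exactly that (n - b) is a border of l (1 ≤ b ≤ n)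
lemma pvCheck_iff_brd {l : List Char} {b : Nat} (hb1 : 1 ≤ b) (hbn : b ≤ l.length) :
    pvCheck l b = true ↔ pvBrd l l.length (l.length - b) = true := by
  rw [pvCheck, pvBrd, List.all_eq_true]
  constructor
  · intro h
    simp only [Bool.and_eq_true, decide_eq_true_eq, List.all_eq_true, List.mem_range]
    refine ⟨by omega, fun i hi => ?_⟩
    have := h (b + i) (by rw [List.mem_range'_1]; omega)
    simp only [beq_iff_eq] at this ⊢
    have h4 : b + i - b = i := by omega
    rw [h4] at this
    have h5 : l.length - (l.length - b) + i = b + i := by omega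
    rw [h5, this]
  · intro h
    simp only [Bool.and_eq_true, decide_eq_true_eq, List.all_eq_true, List.mem_range] at h
    obtain ⟨_, e⟩ := h
    intro i hi
    rw [List.mem_range'_1] at hi
    simp only [beq_iff_eq]
    have := e (i - b) (by omega)
    have h5 : l.length - (l.length - b) + (i - b) = i := by omega
    rw [h5] at this
    rw [beq_iff_eq] at this
    exact this.symm

-- pvFind finds the first b passing pvCheck
lemma pvFind_eq (l : List Char) (t : Nat) (ht : pvCheck l t = true) :
    ∀ fuel b, b ≤ t → t < b + fuel → (∀ m, b ≤ m → m < t → pvCheck l m = false) →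
      pvFind l b fuel = t := by
  intro fuel
  induction fuel with
  | zero => intro b h1 h2; omega
  | succ fuel ih =>
    intro b h1 h2 h3
    rw [pvFind]
    by_cases hb : pvCheck l b = true
    · rw [if_pos hb]
      by_contra hne
      have : b < t := by omega
      have := h3 b (le_refl b) this
      rw [hb] at this; exact absurd this (by simp)
    · rw [if_neg hb]
      have hbt : b ≠ t := fun h => hb (h ▸ ht)
      exact ih (b+1) (by omega) (by omega) (fun m hm => h3 m (by omega))

-- main equivalence for nonempty strings
lemma main_eq (pattern : String) (hne : pattern ≠ "") :
    build_suffix_table pattern = build_suffix_table_alt pattern := by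
  rw [build_suffix_table, build_suffix_table_alt]
  set l := pattern.toList with hl
  have hln : l ≠ [] := by
    intro h
    exact hne (String.toList_eq_nil_iff.mp h)
  have hn : 0 < l.length := List.length_pos_iff.mpr hln
  set n := l.length with hndef
  -- A's table entry
  obtain ⟨hlen, hInv⟩ := pvTableA_spec l (n - 1)
  have hst : (pvTableA l).getD (n - 1) 0 = pvMb l n := by
    rw [pvTableA, ← hndef]
    have := hInv (n-1) (by omega)
    have h4 : n - 1 + 1 = n := by omega
    rwa [h4] at this
  have hmb : pvMb l n < n := pvMb_lt hn
  -- B's found period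
  set t := n - pvMb l n with htdef
  have ht1 : 1 ≤ t := by omega
  have htn : t ≤ n := by omega
  have htc : pvCheck l t = true := by
    rw [pvCheck_iff_brd ht1 htn]
    have h4 : n - t = pvMb l n := by omega
    rw [← hndef, h4]
    exact pvMb_brd hn
  have hfind : pvFind l 1 n = t := by
    apply pvFind_eq l t htc n 1 ht1 (by omega)
    intro m hm1 hmt
    by_contra hmc
    rw [Bool.not_eq_false] at hmc
    rw [pvCheck_iff_brd hm1 (by omega)] at hmc
    have := pvMb_ge hmc
    rw [← hndef] at this
    omega
  simp only [hst, hfind]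
  have hml : ((n : Int) - (pvMb l n : Nat)) = ((t : Nat) : Int) := by
    rw [htdef]; omega
  rw [hml]
  have hpos : ¬ ((t : Int) ≤ 0) := by omega
  rw [if_neg hpos]

-- ===== VERDICT (by name: the statement is the Claim_ definition above) =====
theorem build_suffix_table_spec : Claim_equal_build_suffix_table := by
  intro pattern _ hpre
  unfold Spec_build_suffix_table
  exact main_eq pattern hpre
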